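-- pv_equiv track=rewrite | github.com/hedb/misc_py | euler_641.py | generating_all_permutations_rec
-- ===== SOURCE A (Python) =====
-- def generating_all_permutations_rec(size,possible_powers):
--     ret = []
--
--     if size == 3:
--         break_point = True
--
--     if size == 1: return possible_powers
--     else :
--         suffixes = generating_all_permutations_rec(size-1,possible_powers)
--         for s in suffixes:
--             max_p_in_suffix = min(s)
--             for prefix in possible_powers:
--                 if prefix[-1]<=max_p_in_suffix:
--                     ret.append( prefix + s)
--     return ret
-- ===== SOURCE B (Python) =====
-- def generating_all_permutations_rec(size, possible_powers):
--     current = possible_powers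
--     for _ in range(size - 1):
--         current = [prefix + s
--                    for s, m in ((s, min(s)) for s in current)
--                    for prefix in possible_powers
--                    if prefix[-1] <= m]
--     return current
-- ===== Notes on version B (the rewrite author's own statement) =====
-- stated objective: simpler
-- what changed: Replaced the recursion on size with an explicit bottom-up loop that rebuilds the current list of sequences size-1 times with a flat comprehension, keeping the suffix-outer/prefix-inner order.
import Mathlib
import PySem

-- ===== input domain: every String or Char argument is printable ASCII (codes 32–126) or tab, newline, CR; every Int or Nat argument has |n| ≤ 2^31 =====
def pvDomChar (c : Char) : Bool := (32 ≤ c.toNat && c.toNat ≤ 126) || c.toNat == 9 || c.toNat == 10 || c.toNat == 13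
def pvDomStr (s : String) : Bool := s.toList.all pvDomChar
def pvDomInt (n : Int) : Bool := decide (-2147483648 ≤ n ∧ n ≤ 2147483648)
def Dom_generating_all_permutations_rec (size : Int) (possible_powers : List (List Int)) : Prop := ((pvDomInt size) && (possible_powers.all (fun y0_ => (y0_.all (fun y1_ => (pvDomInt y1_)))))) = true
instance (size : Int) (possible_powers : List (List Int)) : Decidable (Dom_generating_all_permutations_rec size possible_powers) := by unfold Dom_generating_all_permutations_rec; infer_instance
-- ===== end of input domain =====

-- B replaces A's recursion on size by a bottom-up loop rebuilding the sequence list size-1 times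
-- (same output order); equivalence is on the return value, proved for size ≥ 1 where Python A returns.

-- ===== PORT A =====
-- A, literally: if size == 1 return possible_powers, else recurse on size-1 and extend each suffix.
-- The 'size < 1' guard only makes the recursion total: Python A never returns there (RecursionError,
-- excluded by Pre_). min(s) / pfx[-1] raise on empty lists; their 'none' cases skip (excluded by Pre_).
def generating_all_permutations_rec (size : Int) (possible_powers : List (List Int)) : List (List Int) :=
  if size == 1 then possible_powers
  else if size < 1 then []   -- Python: RecursionError; outside Pre_
  else
    let suffixes := generating_all_permutations_rec (size - 1) possible_powers
    suffixes.foldl (fun ret s =>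
      match PySem.List.min? s (fun x => x) with
      | none => ret          -- Python: ValueError from min([]); outside Pre_
      | some max_p_in_suffix =>
        possible_powers.foldl (fun ret pfx =>
          match PySem.List.pyGet? pfx (-1) with
          | none => ret      -- Python: IndexError from pfx[-1]; outside Pre_
          | some last => if last ≤ max_p_in_suffix then ret ++ [pfx ++ s] else ret) ret) []
termination_by size.toNat
decreasing_by
  simp only [beq_iff_eq] at *; omega

-- ===== PORT B =====
-- one comprehension step of Source B: [pfx + s for s in current for pfx in possible_powers if pfx[-1] <= min(s)]
def pvStepB (possible_powers : List (List Int)) (current : List (List Int)) : List (List Int) :=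
  (current.map (fun s => (s, PySem.List.min? s (fun x => x)))).flatMap (fun sm =>
    possible_powers.filterMap (fun pfx =>
      match sm.2, PySem.List.pyGet? pfx (-1) with
      | some m, some last => if last ≤ m then some (pfx ++ sm.1) else none
      | _, _ => none))

def generating_all_permutations_rec_alt (size : Int) (possible_powers : List (List Int)) : List (List Int) :=
  (List.range (size - 1).toNat).foldl (fun current _ => pvStepB possible_powers current) possible_powers

-- ===== PRECONDITION & SPEC =====
-- Pre_ excludes exactly the inputs where Python A raises: size ≤ 0 (RecursionError), and
-- size ≥ 2 with an empty list among possible_powers (IndexError/ValueError from pfx[-1]/min(s)).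
def Pre_generating_all_permutations_rec (size : Int) (possible_powers : List (List Int)) : Prop :=
  1 ≤ size ∧ (size = 1 ∨ [] ∉ possible_powers)
instance (size : Int) (possible_powers : List (List Int)) : Decidable (Pre_generating_all_permutations_rec size possible_powers) := by unfold Pre_generating_all_permutations_rec; infer_instance
def pvWitness_generating_all_permutations_rec : Int × List (List Int) := (3, [[1], [2], [3]])

def Spec_generating_all_permutations_rec (size : Int) (possible_powers : List (List Int)) (out : List (List Int)) : Prop := out = generating_all_permutations_rec_alt size possible_powers
instance (size : Int) (possible_powers : List (List Int)) (out : List (List Int)) : Decidable (Spec_generating_all_permutations_rec size possible_powers out) := by unfold Spec_generating_all_permutations_rec; infer_instance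

-- ===== CLAIM (what is proved, stated in full; the proofs are below) =====
def Claim_equal_generating_all_permutations_rec : Prop := ∀ (size : Int) (possible_powers : List (List Int)), Dom_generating_all_permutations_rec size possible_powers → Pre_generating_all_permutations_rec size possible_powers → Spec_generating_all_permutations_rec size possible_powers (generating_all_permutations_rec size possible_powers)

-- ===== LEMMAS AND PROOFS =====

-- A's inner loop over possible_powers equals B's filterMap, with the accumulator pulled out.
lemma innerA_eq (pp : List (List Int)) (s : List Int) (m : Int)
    (hm : PySem.List.min? s (fun x => x) = some m) (acc : List (List Int)) :
    pp.foldl (fun ret pfx =>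
      match PySem.List.pyGet? pfx (-1) with
      | none => ret
      | some last => if last ≤ m then ret ++ [pfx ++ s] else ret) acc
    = acc ++ pp.filterMap (fun pfx =>
        match PySem.List.min? s (fun x => x), PySem.List.pyGet? pfx (-1) with
        | some m', some last => if last ≤ m' then some (pfx ++ s) else none
        | _, _ => none) := by
  induction pp generalizing acc with
  | nil => simp
  | cons p t ih =>
    simp only [List.foldl_cons, List.filterMap_cons, hm]
    cases hp : PySem.List.pyGet? p (-1) with
    | none => simp only [ih, hm]
    | some last =>
      by_cases hle : last ≤ m
      · simp only [hle, if_true, ih, hm, List.append_assoc, List.singleton_append]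
      · simp only [hle, if_false, ih, hm]

-- A's outer loop over the suffixes equals one step of B.
lemma outerA_eq (pp : List (List Int)) (l : List (List Int)) (acc : List (List Int)) :
    l.foldl (fun ret s =>
      match PySem.List.min? s (fun x => x) with
      | none => ret
      | some max_p_in_suffix =>
        pp.foldl (fun ret pfx =>
          match PySem.List.pyGet? pfx (-1) with
          | none => ret
          | some last => if last ≤ max_p_in_suffix then ret ++ [pfx ++ s] else ret) ret) acc
    = acc ++ pvStepB pp l := by
  induction l generalizing acc with
  | nil => simp [pvStepB]
  | cons s t ih =>
    simp only [List.foldl_cons, pvStepB]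
    cases hmin : PySem.List.min? s (fun x => x) with
    | none => simp [ih, pvStepB, hmin]
    | some m =>
      rw [ih]
      simp only [innerA_eq pp s m hmin, pvStepB, List.map_cons, List.flatMap_cons,
        List.append_assoc]

lemma A_succ (n : Nat) (pp : List (List Int)) :
    generating_all_permutations_rec ((n : Int) + 1) pp
    = (List.range n).foldl (fun current _ => pvStepB pp current) pp := by
  induction n with
  | zero => rw [generating_all_permutations_rec]; simp
  | succ k ih =>
    rw [generating_all_permutations_rec]
    have h1 : (((k + 1 : Nat) : Int) + 1 == 1) = false := by simp; omega
    have h2 : ¬ (((k + 1 : Nat) : Int) + 1 < 1) := by push_cast; omega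
    have h3 : ((k + 1 : Nat) : Int) + 1 - 1 = (k : Int) + 1 := by push_cast; ring
    simp only [h1, if_neg h2, h3, ih, if_false, Bool.false_eq_true]
    rw [outerA_eq, List.range_succ, List.foldl_append]
    simp

-- ===== VERDICT (by name: the statement is the Claim_ definition above) =====
theorem generating_all_permutations_rec_spec : Claim_equal_generating_all_permutations_rec := by
  intro size pp _ hpre
  unfold Spec_generating_all_permutations_rec generating_all_permutations_rec_alt
  obtain ⟨h1, _⟩ := hpre
  have hsz : size = ((size - 1).toNat : Int) + 1 := by omega
  rw [hsz, A_succ]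
  simp
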